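-- pv_equiv track=rewrite | github.com/abrahao221b/FreeCodeCampScientificComputingWithPythonMyResolutions | PythonFreeCodePythonChallengs/Project3/budget.py | marck_out
-- ===== SOURCE A (Python) =====
-- def marck_out(porcentage, element, output, dash_figures):
--   i = 0
--   space = 0
--   phrase = ""
--
--   # Printing the "o" character
--   for term in porcentage:
--     if porcentage[term] >= element:
--       if "o" not in phrase:
--         if i != 0:
--           space = 1 + 3 * i
--           for _ in range(space):
--             phrase += " "
--           phrase += "o"
--         else:
--           phrase += " o"
--       else:
--         phrase += "  o"
--     i += 1
--   if "o" in phrase: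
--     size_jump = dash_figures - len(phrase)
--     for _ in range(size_jump):
--       phrase += " "
--   else:
--     for _ in range(dash_figures):
--       phrase += " "
--   phrase += "\n"
--   output += phrase
--
--   return output
-- ===== SOURCE B (Python) =====
-- def marck_out(porcentage, element, output, dash_figures):
--     vals = list(porcentage.values())
--     count = sum(1 for v in vals if v >= element)
--     if count == 0:
--         phrase = ""
--     else:
--         k = next(i for i, v in enumerate(vals) if v >= element)
--         phrase = " " * (1 + 3 * k) + "o" + "  o" * (count - 1)
--     return output + phrase + " " * max(0, dash_figures - len(phrase)) + "\n"
-- ===== Notes on version B (the rewrite author's own statement) =====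
-- stated objective: simpler
-- what changed: A threads an index and an 'is there already an o' membership test through a conditional-append loop and pads in two separate character-by-character loops; B computes the first qualifying index and the count of qualifying entries in one pass and constructs the row directly by string repetition with a single max(0,...) padding.
import Mathlib
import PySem

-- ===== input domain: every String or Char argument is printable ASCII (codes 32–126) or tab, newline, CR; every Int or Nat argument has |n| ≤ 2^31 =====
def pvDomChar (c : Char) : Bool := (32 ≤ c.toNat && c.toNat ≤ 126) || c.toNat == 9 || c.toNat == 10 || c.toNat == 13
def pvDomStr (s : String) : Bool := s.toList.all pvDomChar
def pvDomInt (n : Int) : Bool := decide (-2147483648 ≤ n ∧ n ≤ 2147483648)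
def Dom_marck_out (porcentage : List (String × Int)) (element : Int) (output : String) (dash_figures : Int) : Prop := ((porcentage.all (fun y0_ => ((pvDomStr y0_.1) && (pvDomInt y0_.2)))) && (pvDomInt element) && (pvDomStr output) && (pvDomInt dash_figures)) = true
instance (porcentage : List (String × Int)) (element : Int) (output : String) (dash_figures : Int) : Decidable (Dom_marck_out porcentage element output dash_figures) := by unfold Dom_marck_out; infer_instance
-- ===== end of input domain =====

-- B replaces A's index-threaded conditional-append loop by computing the first qualifying
-- index and the count of qualifying entries, then constructing the row directly (simpler decomposition).

-- ===== PORT A =====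
-- loop body of A's `for term in porcentage` (state = (i, phrase), exactly A's variables)
def marckStep (d : PySem.Dict String Int) (element : Int) (st : Int × List Char) (term : String) : Int × List Char :=
  let phrase :=
    if element ≤ (d.get? term).getD 0 then          -- porcentage[term] >= element (term is a key of d, so get? = some)
      if PySem.Chars.isIn ['o'] st.2 = false then   -- "o" not in phrase
        if st.1 ≠ 0 then
          ((PySem.List.pyRange 0 (1 + 3 * st.1) 1).foldl (fun p _ => p ++ [' ']) st.2) ++ ['o']
        else st.2 ++ [' ', 'o']
      else st.2 ++ [' ', ' ', 'o']
    else st.2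
  (st.1 + 1, phrase)

def marck_out (porcentage : List (String × Int)) (element : Int) (output : String) (dash_figures : Int) : String :=
  let d := PySem.Dict.ofList porcentage
  let r := d.keys.foldl (marckStep d element) (0, ([] : List Char))
  let phrase := r.2
  let phrase :=
    if PySem.Chars.isIn ['o'] phrase = true then
      (PySem.List.pyRange 0 (dash_figures - phrase.length) 1).foldl (fun p _ => p ++ [' ']) phrase
    else
      (PySem.List.pyRange 0 dash_figures 1).foldl (fun p _ => p ++ [' ']) phrase
  String.ofList (output.toList ++ (phrase ++ ['\n']))

-- ===== PORT B =====
def marck_out_alt (porcentage : List (String × Int)) (element : Int) (output : String) (dash_figures : Int) : String :=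
  let d := PySem.Dict.ofList porcentage
  let vals := d.values
  let count := vals.countP (fun v => element ≤ v)
  let phrase : List Char :=
    if count = 0 then []
    else PySem.List.pyRepeat [' '] (1 + 3 * (vals.findIdx (fun v => element ≤ v) : Int))
         ++ ['o'] ++ PySem.List.pyRepeat [' ', ' ', 'o'] ((count : Int) - 1)
  String.ofList (output.toList ++ phrase ++ PySem.List.pyRepeat [' '] (max 0 (dash_figures - phrase.length)) ++ ['\n'])

-- ===== PRECONDITION & SPEC =====
def Spec_marck_out (porcentage : List (String × Int)) (element : Int) (output : String) (dash_figures : Int) (out : String) : Prop := out = marck_out_alt porcentage element output dash_figures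
instance (porcentage : List (String × Int)) (element : Int) (output : String) (dash_figures : Int) (out : String) : Decidable (Spec_marck_out porcentage element output dash_figures out) := by unfold Spec_marck_out; infer_instance

-- ===== CLAIM (what is proved, stated in full; the proofs are below) =====
def Claim_equal_marck_out : Prop := ∀ (porcentage : List (String × Int)) (element : Int) (output : String) (dash_figures : Int), Dom_marck_out porcentage element output dash_figures → Spec_marck_out porcentage element output dash_figures (marck_out porcentage element output dash_figures)

-- ===== LEMMAS AND PROOFS =====

-- A's loop body, expressed on the looked-up value
def stepV (element : Int) (st : Int × List Char) (v : Int) : Int × List Char :=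
  let phrase :=
    if element ≤ v then
      if PySem.Chars.isIn ['o'] st.2 = false then
        if st.1 ≠ 0 then
          ((PySem.List.pyRange 0 (1 + 3 * st.1) 1).foldl (fun p _ => p ++ [' ']) st.2) ++ ['o']
        else st.2 ++ [' ', 'o']
      else st.2 ++ [' ', ' ', 'o']
    else st.2
  (st.1 + 1, phrase)

theorem marckStep_eq_stepV (d : PySem.Dict String Int) (element : Int) (st : Int × List Char) (term : String) :
    marckStep d element st term = stepV element st (d.getD term 0) := by
  simp [marckStep, stepV, PySem.Dict.getD_eq_get?_getD]

theorem isIn_o_iff (l : List Char) : PySem.Chars.isIn ['o'] l = true ↔ 'o' ∈ l := by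
  rw [PySem.Chars.isIn_iff_infix]; exact List.singleton_infix_iff _ l

theorem foldl_pad {α : Type} (l : List α) (init : List Char) :
    l.foldl (fun p _ => p ++ [' ']) init = init ++ List.replicate l.length ' ' := by
  induction l generalizing init with
  | nil => simp
  | cons x t ih =>
    rw [List.foldl_cons, ih, List.append_assoc]
    simp [List.replicate_succ]

theorem length_pyRange_one (n : Int) : (PySem.List.pyRange 0 n 1).length = n.toNat := by
  simp [pysem]

-- the row B builds, as a recursion following A's loop (first qualifying index gets the spaces)
def bodyB (element : Int) : List Int → Int → List Char
  | [], _ => []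
  | v :: rest, i =>
    if element ≤ v then
      List.replicate (1 + 3 * i).toNat ' ' ++ ['o']
        ++ (List.replicate (rest.countP (fun w => element ≤ w)) [' ', ' ', 'o']).flatten
    else bodyB element rest (i + 1)

theorem foldl_after_o (element : Int) (vals : List Int) (i : Int) (ph : List Char) (h : 'o' ∈ ph) :
    vals.foldl (stepV element) (i, ph)
      = (i + vals.length, ph ++ (List.replicate (vals.countP (fun w => element ≤ w)) [' ', ' ', 'o']).flatten) := by
  induction vals generalizing i ph with
  | nil => simp
  | cons v rest ih =>
    by_cases hq : element ≤ v
    · have hin : PySem.Chars.isIn ['o'] ph = true := (isIn_o_iff ph).mpr h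
      rw [List.foldl_cons, show stepV element (i, ph) v = (i + 1, ph ++ [' ', ' ', 'o']) from by
            simp [stepV, hq, hin]]
      rw [ih (i + 1) _ (by simp [h])]
      simp [hq, List.replicate_succ, List.append_assoc]
      omega
    · rw [List.foldl_cons, show stepV element (i, ph) v = (i + 1, ph) from by simp [stepV, hq]]
      rw [ih (i + 1) ph h]
      simp [hq]
      omega

theorem foldl_before_o (element : Int) (vals : List Int) (i : Int) (ph : List Char)
    (hi : 0 ≤ i) (h : 'o' ∉ ph) :
    vals.foldl (stepV element) (i, ph) = (i + vals.length, ph ++ bodyB element vals i) := by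
  induction vals generalizing i ph with
  | nil => simp [bodyB]
  | cons v rest ih =>
    by_cases hq : element ≤ v
    · have hin : PySem.Chars.isIn ['o'] ph = false := by
        cases hin : PySem.Chars.isIn ['o'] ph
        · rfl
        · exact absurd ((isIn_o_iff ph).mp hin) h
      have hstep : stepV element (i, ph) v = (i + 1, ph ++ List.replicate (1 + 3 * i).toNat ' ' ++ ['o']) := by
        by_cases hz : i = 0
        · subst hz; simp [stepV, hq, hin]
        · simp [stepV, hq, hin, hz]
      rw [List.foldl_cons, hstep,
          foldl_after_o element rest (i + 1) _ (by simp)]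
      simp [bodyB, hq, List.append_assoc]
      omega
    · rw [List.foldl_cons, show stepV element (i, ph) v = (i + 1, ph) from by simp [stepV, hq]]
      rw [ih (i + 1) ph (by omega) h]
      simp [bodyB, hq]
      omega

theorem bodyB_closed (element : Int) (vals : List Int) (i : Int) (hi : 0 ≤ i) :
    bodyB element vals i
      = (if vals.countP (fun w => element ≤ w) = 0 then []
         else List.replicate (1 + 3 * (i + (vals.findIdx (fun w => element ≤ w) : Int))).toNat ' ' ++ ['o']
              ++ (List.replicate (vals.countP (fun w => element ≤ w) - 1) [' ', ' ', 'o']).flatten) := by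
  induction vals generalizing i with
  | nil => simp [bodyB]
  | cons v rest ih =>
    by_cases hq : element ≤ v
    · simp [bodyB, hq, List.findIdx_cons]
    · rw [bodyB, if_neg hq, ih (i + 1) (by omega)]
      have hdec : (decide (element ≤ v)) = false := by simp [hq]
      simp only [List.countP_cons, List.findIdx_cons, hdec, cond_false,
        Nat.cast_add, Nat.cast_one]
      have harith : i + 1 + (↑(List.findIdx (fun w => decide (element ≤ w)) rest) : Int)
          = i + (↑(List.findIdx (fun w => decide (element ≤ w)) rest) + 1) := by ring
      rw [harith]
      simp

-- ===== VERDICT (by name: the statement is the Claim_ definition above) =====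
theorem marck_out_spec : Claim_equal_marck_out := by
  intro porcentage element output dash_figures _
  unfold Spec_marck_out marck_out marck_out_alt
  dsimp only
  set d := PySem.Dict.ofList porcentage with hd
  have hvals : d.values = d.keys.map (fun k => d.getD k 0) :=
    PySem.Dict.values_eq_map_keys d (PySem.Dict.nodup_keys_ofList porcentage) 0
  have hfold : d.keys.foldl (marckStep d element) (0, ([] : List Char))
      = d.values.foldl (stepV element) (0, ([] : List Char)) := by
    rw [hvals, List.foldl_map]
    exact congrArg (fun f => List.foldl f ((0 : Int), ([] : List Char)) d.keys)
      (funext fun st => funext fun k => marckStep_eq_stepV d element st k)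
  rw [hfold, foldl_before_o element d.values 0 [] le_rfl (by simp),
      bodyB_closed element d.values 0 le_rfl]
  set vals := d.values
  set p : Int → Bool := fun w => decide (element ≤ w) with hp
  by_cases hc : vals.countP p = 0
  · simp only [hc]
    have h0 : PySem.Chars.isIn ['o'] ([] : List Char) = false := by decide
    simp only [List.nil_append]
    rw [if_neg (by simp [h0]), foldl_pad, length_pyRange_one,
        PySem.List.pyRepeat_singleton]
    have hmax : dash_figures.toNat = (max 0 dash_figures).toNat := by omega
    simp [hmax]
  · simp only [if_neg hc]
    set k : Nat := vals.findIdx p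
    set body : List Char :=
      List.replicate (1 + 3 * ((0 : Int) + (k : Int))).toNat ' ' ++ ['o']
        ++ (List.replicate (vals.countP p - 1) [' ', ' ', 'o']).flatten with hbody
    have hmem : 'o' ∈ body := by simp [hbody]
    rw [if_pos ((isIn_o_iff _).mpr (by simp [hmem])), foldl_pad, length_pyRange_one,
        PySem.List.pyRepeat_singleton, PySem.List.pyRepeat_singleton]
    have h1 : ((vals.countP p : Int) - 1).toNat = vals.countP p - 1 := by omega
    have h2 : (1 + 3 * ((0 : Int) + (k : Int))) = 1 + 3 * (k : Int) := by ring
    have hrep : PySem.List.pyRepeat [' ', ' ', 'o'] ((vals.countP p : Int) - 1)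
        = (List.replicate (vals.countP p - 1) [' ', ' ', 'o']).flatten := by
      simp [PySem.List.pyRepeat, h1]
    have h3 : ∀ m : Int, (dash_figures - m).toNat = (max 0 (dash_figures - m)).toNat := by
      intro m; omega
    simp only [List.nil_append, hrep, hbody, h2]
    rw [h3]
    simp [List.append_assoc]
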